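-- pv_equiv track=rewrite | github.com/antoniacobaeus/aoc | 2023/10.py | count_dir
-- ===== SOURCE A (Python) =====
-- def count_dir(fr, dir, loop, grid, pipes):
--     x, y = fr
--     s = 0
--     last = None
--     l, r = 0, 0
--     while 0 < x < (len(grid[0]) - 1) and 0 < y < (len(grid) - 1):
--         x += dir[0]
--         y += dir[1]
--
--         if (x, y) in loop:
--             if last is None or not (x, y) in pipes[last]:
--                 # new line
--                 s += l % 2 == 1 and r % 2 == 1
--                 l, r = 0, 0
--
--             if dir[0]:
--                 l += (x, y - 1) in pipes[(x, y)]
--                 r += (x, y + 1) in pipes[(x, y)]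
--             else:
--                 l += (x - 1, y) in pipes[(x, y)]
--                 r += (x + 1, y) in pipes[(x, y)]
--             last = (x, y)
--     s += l % 2 == 1 and r % 2 == 1
--     return s
-- ===== SOURCE B (Python) =====
-- def count_dir(fr, dir, loop, grid, pipes):
--     # pass 1: walk the ray, recording for each loop cell on it
--     # (connected-to-previous, left-opening, right-opening)
--     x, y = fr
--     entries = []
--     prev = None
--     while 0 < x < len(grid[0]) - 1 and 0 < y < len(grid) - 1:
--         x += dir[0]
--         y += dir[1]
--         if (x, y) in loop:
--             conn = prev is not None and (x, y) in pipes[prev]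
--             if dir[0]:
--                 lo = (x, y - 1) in pipes[(x, y)]
--                 ro = (x, y + 1) in pipes[(x, y)]
--             else:
--                 lo = (x - 1, y) in pipes[(x, y)]
--                 ro = (x + 1, y) in pipes[(x, y)]
--             entries.append((conn, lo, ro))
--             prev = (x, y)
--     # pass 2: group the records into maximal connected segments
--     segments = []
--     cur = None
--     for conn, lo, ro in entries:
--         if conn and cur is not None:
--             cur.append((lo, ro))
--         else:
--             cur = [(lo, ro)]
--             segments.append(cur)
--     # pass 3: a segment crosses iff both its opening counts are odd
--     return sum(sum(lo for lo, _ in seg) % 2 == 1 and sum(ro for _, ro in seg) % 2 == 1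
--                for seg in segments)
-- ===== Notes on version B (the rewrite author's own statement) =====
-- stated objective: alternative
-- what changed: Replaces A's fused stateful walk (running parity accumulators, segment-break bookkeeping and counting interleaved in one loop) by a three-pass pipeline: walk the ray collecting per-loop-cell (connected-to-previous, left-opening, right-opening) records, group them into maximal connected segments, then count the segments whose left and right opening counts are both odd.
import Mathlib
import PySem

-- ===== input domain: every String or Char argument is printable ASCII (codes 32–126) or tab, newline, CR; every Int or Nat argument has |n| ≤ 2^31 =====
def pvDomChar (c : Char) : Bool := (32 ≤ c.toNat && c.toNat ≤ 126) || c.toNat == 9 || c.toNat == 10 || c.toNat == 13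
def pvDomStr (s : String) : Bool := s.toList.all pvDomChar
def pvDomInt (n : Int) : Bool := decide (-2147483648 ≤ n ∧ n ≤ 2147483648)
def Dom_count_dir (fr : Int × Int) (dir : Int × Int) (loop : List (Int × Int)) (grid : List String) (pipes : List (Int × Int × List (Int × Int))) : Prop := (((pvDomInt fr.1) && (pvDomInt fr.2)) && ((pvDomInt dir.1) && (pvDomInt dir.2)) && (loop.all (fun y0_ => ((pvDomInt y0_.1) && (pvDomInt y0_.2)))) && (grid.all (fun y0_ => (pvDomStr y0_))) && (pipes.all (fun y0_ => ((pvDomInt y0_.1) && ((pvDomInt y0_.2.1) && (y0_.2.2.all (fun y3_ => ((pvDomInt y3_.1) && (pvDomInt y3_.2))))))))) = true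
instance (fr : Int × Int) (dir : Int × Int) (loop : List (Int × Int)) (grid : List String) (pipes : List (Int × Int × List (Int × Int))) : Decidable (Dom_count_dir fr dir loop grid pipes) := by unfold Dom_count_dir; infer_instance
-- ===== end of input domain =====

-- B replaces A's fused stateful walk by a three-pass pipeline (walk → group into
-- connected segments → count odd/odd segments); same cost, different decomposition.

-- shared representation primitive: dict lookup pipes[p] (first match in the
-- insertion-ordered association list; default [] is only reached outside Pre_)
def pvPipesAt (pipes : List (Int × Int × List (Int × Int))) (p : Int × Int) : List (Int × Int) :=
  ((pipes.find? (fun q => (q.1, q.2.1) == p)).map (fun q => q.2.2)).getD []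

def pvB2i (b : Bool) : Int := if b then 1 else 0

-- Python's `l % 2 == 1 and r % 2 == 1` added to an int
def pvFin (l r : Int) : Int := if l % 2 == 1 && r % 2 == 1 then 1 else 0

-- ===== PORT A =====
-- A's while loop, fuel recursion over the same state (x, y, s, last, l, r);
-- the fuel chosen in count_dir exceeds the iteration count on every input in Pre_
def countDirGo (w h dx dy : Int) (loop : List (Int × Int)) (pipes : List (Int × Int × List (Int × Int))) :
    Nat → Int → Int → Int → Option (Int × Int) → Int → Int → Int
  | 0, _, _, s, _, l, r => s + pvFin l r
  | fuel + 1, x, y, s, last, l, r =>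
    if 0 < x ∧ x < w - 1 ∧ 0 < y ∧ y < h - 1 then
      let x' := x + dx
      let y' := y + dy
      if loop.contains (x', y') then
        let brk : Bool := match last with
          | none => true
          | some p => !((pvPipesAt pipes p).contains (x', y'))
        let s' := if brk then s + pvFin l r else s
        let l0 : Int := if brk then 0 else l
        let r0 : Int := if brk then 0 else r
        let l' := if dx ≠ 0 then l0 + pvB2i ((pvPipesAt pipes (x', y')).contains (x', y' - 1))
                  else l0 + pvB2i ((pvPipesAt pipes (x', y')).contains (x' - 1, y'))
        let r' := if dx ≠ 0 then r0 + pvB2i ((pvPipesAt pipes (x', y')).contains (x', y' + 1))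
                  else r0 + pvB2i ((pvPipesAt pipes (x', y')).contains (x' + 1, y'))
        countDirGo w h dx dy loop pipes fuel x' y' s' (some (x', y')) l' r'
      else countDirGo w h dx dy loop pipes fuel x' y' s last l r
    else s + pvFin l r

def count_dir (fr : Int × Int) (dir : Int × Int) (loop : List (Int × Int)) (grid : List String) (pipes : List (Int × Int × List (Int × Int))) : Int :=
  countDirGo ((grid.headD "").length : Int) (grid.length : Int) dir.1 dir.2 loop pipes
    (grid.length + (grid.headD "").length + 1) fr.1 fr.2 0 none 0 0

-- ===== PORT B =====
-- pass 1: walk the ray collecting (connected-to-previous, left-opening, right-opening)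
def pvWalk (w h dx dy : Int) (loop : List (Int × Int)) (pipes : List (Int × Int × List (Int × Int))) :
    Nat → Int → Int → Option (Int × Int) → List (Bool × Bool × Bool)
  | 0, _, _, _ => []
  | fuel + 1, x, y, prev =>
    if 0 < x ∧ x < w - 1 ∧ 0 < y ∧ y < h - 1 then
      let x' := x + dx
      let y' := y + dy
      if loop.contains (x', y') then
        let conn : Bool := match prev with
          | none => false
          | some p => (pvPipesAt pipes p).contains (x', y')
        let lo := if dx ≠ 0 then (pvPipesAt pipes (x', y')).contains (x', y' - 1)
                  else (pvPipesAt pipes (x', y')).contains (x' - 1, y')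
        let ro := if dx ≠ 0 then (pvPipesAt pipes (x', y')).contains (x', y' + 1)
                  else (pvPipesAt pipes (x', y')).contains (x' + 1, y')
        (conn, lo, ro) :: pvWalk w h dx dy loop pipes fuel x' y' (some (x', y'))
      else pvWalk w h dx dy loop pipes fuel x' y' prev
    else []

-- pass 2: group the records into maximal connected segments
def pvGroupGo (cur : List (Bool × Bool)) : List (Bool × Bool × Bool) → List (List (Bool × Bool))
  | [] => [cur]
  | (conn, lo, ro) :: rest =>
    if conn then pvGroupGo (cur ++ [(lo, ro)]) rest
    else cur :: pvGroupGo [(lo, ro)] rest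

def pvGroup : List (Bool × Bool × Bool) → List (List (Bool × Bool))
  | [] => []
  | (_, lo, ro) :: rest => pvGroupGo [(lo, ro)] rest

-- pass 3: a segment crosses iff both its opening counts are odd
def pvSegL (seg : List (Bool × Bool)) : Int := (seg.map (fun e => pvB2i e.1)).sum
def pvSegR (seg : List (Bool × Bool)) : Int := (seg.map (fun e => pvB2i e.2)).sum
def pvSegVal (seg : List (Bool × Bool)) : Int := pvFin (pvSegL seg) (pvSegR seg)

def count_dir_alt (fr : Int × Int) (dir : Int × Int) (loop : List (Int × Int)) (grid : List String) (pipes : List (Int × Int × List (Int × Int))) : Int :=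
  ((pvGroup (pvWalk ((grid.headD "").length : Int) (grid.length : Int) dir.1 dir.2 loop pipes
      (grid.length + (grid.headD "").length + 1) fr.1 fr.2 none)).map pvSegVal).sum

-- ===== PRECONDITION & SPEC =====
def pvPos (fr dir : Int × Int) (k : Nat) : Int × Int := (fr.1 + k * dir.1, fr.2 + k * dir.2)
def pvInterior (grid : List String) (p : Int × Int) : Bool :=
  decide (0 < p.1 ∧ p.1 < ((grid.headD "").length : Int) - 1 ∧ 0 < p.2 ∧ p.2 < (grid.length : Int) - 1)

-- Pre_ excludes exactly the inputs where the Python A raises or diverges: an empty grid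
-- with fr.1 > 0 (IndexError on grid[0]), dir = (0,0) started inside the grid interior
-- (infinite loop), and rays on which some visited cell lies in `loop` but is not a key
-- of `pipes` (KeyError).  A returns normally on every other input.
def Pre_count_dir (fr : Int × Int) (dir : Int × Int) (loop : List (Int × Int)) (grid : List String) (pipes : List (Int × Int × List (Int × Int))) : Prop :=
  (grid ≠ [] ∨ fr.1 ≤ 0) ∧
  (dir = (0, 0) → pvInterior grid fr = false) ∧
  (∀ k ∈ List.range (grid.length + (grid.headD "").length + 1),
     (∀ j ∈ List.range (k + 1), pvInterior grid (pvPos fr dir j) = true) →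
     loop.contains (pvPos fr dir (k + 1)) = true →
     (pipes.any (fun q => (q.1, q.2.1) == pvPos fr dir (k + 1))) = true)
instance (fr : Int × Int) (dir : Int × Int) (loop : List (Int × Int)) (grid : List String) (pipes : List (Int × Int × List (Int × Int))) : Decidable (Pre_count_dir fr dir loop grid pipes) := by unfold Pre_count_dir; infer_instance

def pvWitness_count_dir : (Int × Int) × (Int × Int) × (List (Int × Int)) × List String × (List (Int × Int × List (Int × Int))) :=
  ((1, 1), (1, 0), [(2, 1)], ["....", "....", "...."], [(2, 1, [(2, 0), (2, 2)])])

def Spec_count_dir (fr : Int × Int) (dir : Int × Int) (loop : List (Int × Int)) (grid : List String) (pipes : List (Int × Int × List (Int × Int))) (out : Int) : Prop := out = count_dir_alt fr dir loop grid pipes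
instance (fr : Int × Int) (dir : Int × Int) (loop : List (Int × Int)) (grid : List String) (pipes : List (Int × Int × List (Int × Int))) (out : Int) : Decidable (Spec_count_dir fr dir loop grid pipes out) := by unfold Spec_count_dir; infer_instance

-- ===== CLAIM (what is proved, stated in full; the proofs are below) =====
def Claim_equal_count_dir : Prop := ∀ (fr : Int × Int) (dir : Int × Int) (loop : List (Int × Int)) (grid : List String) (pipes : List (Int × Int × List (Int × Int))), Dom_count_dir fr dir loop grid pipes → Pre_count_dir fr dir loop grid pipes → Spec_count_dir fr dir loop grid pipes (count_dir fr dir loop grid pipes)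

-- ===== LEMMAS AND PROOFS =====

-- counting continuation: what A's remaining loop adds to s given accumulators l, r
def pvCont (l r : Int) : List (Bool × Bool × Bool) → Int
  | [] => pvFin l r
  | (conn, lo, ro) :: rest =>
    if conn then pvCont (l + pvB2i lo) (r + pvB2i ro) rest
    else pvFin l r + pvCont (pvB2i lo) (pvB2i ro) rest

theorem countDirGo_eq_cont (w h dx dy : Int) (loop : List (Int × Int))
    (pipes : List (Int × Int × List (Int × Int))) :
    ∀ (fuel : Nat) (x y s : Int) (last : Option (Int × Int)) (l r : Int),
      countDirGo w h dx dy loop pipes fuel x y s last l r =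
        s + pvCont l r (pvWalk w h dx dy loop pipes fuel x y last) := by
  intro fuel
  induction fuel with
  | zero => intro x y s last l r; simp [countDirGo, pvWalk, pvCont]
  | succ n ih =>
    intro x y s last l r
    simp only [countDirGo, pvWalk]
    by_cases hI : 0 < x ∧ x < w - 1 ∧ 0 < y ∧ y < h - 1
    · simp only [if_pos hI]
      by_cases hL : loop.contains (x + dx, y + dy)
      · simp only [if_pos hL, ih]
        cases last with
        | none =>
          by_cases hdx : dx ≠ 0 <;> simp [pvCont, hdx] <;> ring
        | some p =>
          by_cases hc : (x + dx, y + dy) ∈ pvPipesAt pipes p <;>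
            by_cases hdx : dx ≠ 0 <;>
            simp [pvCont, hc, hdx] <;> ring
      · simp only [if_neg hL, ih]
    · simp only [if_neg hI, pvCont]

theorem pvSegL_append_single (cur : List (Bool × Bool)) (e : Bool × Bool) :
    pvSegL (cur ++ [e]) = pvSegL cur + pvB2i e.1 := by
  simp [pvSegL]

theorem pvSegR_append_single (cur : List (Bool × Bool)) (e : Bool × Bool) :
    pvSegR (cur ++ [e]) = pvSegR cur + pvB2i e.2 := by
  simp [pvSegR]

theorem pvCont_eq_groupGo :
    ∀ (rest : List (Bool × Bool × Bool)) (cur : List (Bool × Bool)),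
      pvCont (pvSegL cur) (pvSegR cur) rest = ((pvGroupGo cur rest).map pvSegVal).sum := by
  intro rest
  induction rest with
  | nil => intro cur; simp [pvCont, pvGroupGo, pvSegVal]
  | cons e rest ih =>
    intro cur
    obtain ⟨conn, lo, ro⟩ := e
    cases conn with
    | true =>
      simp only [pvCont, pvGroupGo, if_true]
      rw [← pvSegL_append_single cur (lo, ro), ← pvSegR_append_single cur (lo, ro)]
      exact ih _
    | false =>
      simp only [pvCont, pvGroupGo, Bool.false_eq_true, if_false, List.map_cons, List.sum_cons]
      have h1 : pvB2i lo = pvSegL [(lo, ro)] := by simp [pvSegL]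
      have h2 : pvB2i ro = pvSegR [(lo, ro)] := by simp [pvSegR]
      rw [h1, h2, ih [(lo, ro)]]
      rfl

theorem pvCont_zero_eq_group (entries : List (Bool × Bool × Bool)) :
    pvCont 0 0 entries = ((pvGroup entries).map pvSegVal).sum := by
  cases entries with
  | nil => simp [pvCont, pvGroup, pvFin]
  | cons e rest =>
    obtain ⟨conn, lo, ro⟩ := e
    have hL : pvB2i lo = pvSegL [(lo, ro)] := by simp [pvSegL]
    have hR : pvB2i ro = pvSegR [(lo, ro)] := by simp [pvSegR]
    cases conn with
    | true =>
      simp only [pvCont, pvGroup, if_true, zero_add]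
      rw [hL, hR]; exact pvCont_eq_groupGo rest [(lo, ro)]
    | false =>
      simp only [pvCont, pvGroup, Bool.false_eq_true, if_false]
      have : pvFin 0 0 = 0 := by decide
      rw [this, zero_add, hL, hR]
      exact pvCont_eq_groupGo rest [(lo, ro)]

-- ===== VERDICT (by name: the statement is the Claim_ definition above) =====
theorem count_dir_spec : Claim_equal_count_dir := by
  intro fr dir loop grid pipes _ _
  unfold Spec_count_dir count_dir count_dir_alt
  rw [countDirGo_eq_cont, zero_add, pvCont_zero_eq_group]
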